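-- pv_equiv track=rewrite | github.com/Dav-sa/Python-ATBS | DictProjects/ChessValid.py | isOnValidSpace
-- ===== SOURCE A (Python) =====
-- def isOnValidSpace(chessboard):
--     allValidPositions = []
--     for j in ["a", "b", "c", "d", "e", "f", "g", "h"]:
--         for i in range(1, 9):
--             allValidPositions.append(str(i) + j)
--     for key in chessboard.keys():
--         if key in allValidPositions:
--             return True
--         return False
-- ===== SOURCE B (Python) =====
-- def isOnValidSpace(chessboard):
--     # Same first-key-only short-circuit as A, but with a direct O(1) predicate
--     # instead of building and scanning a 64-element list.
--     for key in chessboard.keys():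
--         return len(key) == 2 and key[0] in "12345678" and key[1] in "abcdefgh"
-- ===== Notes on version B (the rewrite author's own statement) =====
-- stated objective: simpler
-- what changed: Drops the 64-element list construction and its linear membership scan; the first key is judged by a direct constant-time predicate (length 2, digit char, file char), keeping the first-key-only short-circuit and None on an empty dict.
import Mathlib
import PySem

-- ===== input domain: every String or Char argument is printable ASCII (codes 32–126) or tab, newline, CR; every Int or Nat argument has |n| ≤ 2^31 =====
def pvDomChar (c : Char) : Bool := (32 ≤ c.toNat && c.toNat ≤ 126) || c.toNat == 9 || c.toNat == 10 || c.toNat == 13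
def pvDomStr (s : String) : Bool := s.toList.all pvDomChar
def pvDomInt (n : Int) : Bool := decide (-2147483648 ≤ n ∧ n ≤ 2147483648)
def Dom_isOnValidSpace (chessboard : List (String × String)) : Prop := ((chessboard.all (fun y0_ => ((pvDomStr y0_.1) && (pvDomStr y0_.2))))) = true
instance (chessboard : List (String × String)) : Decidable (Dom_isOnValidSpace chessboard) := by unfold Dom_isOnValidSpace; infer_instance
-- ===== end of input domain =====

-- B replaces A's 64-element position list and linear membership scan by a direct
-- constant-time predicate on the first key (simpler; same first-key short-circuit
-- and None-on-empty behaviour).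


-- ===== PORT A =====
-- Strings are handled on the List Char side (PySem convention); 'str(i) + j' is
-- 'PySem.Int.toChars i ++ j', and 'key in allValidPositions' is list membership
-- under string (char-list) equality — exact for Python's '==' on str.
def isOnValidSpace (chessboard : List (String × String)) : Option Bool :=
  let allValidPositions : List (List Char) :=
    (["a", "b", "c", "d", "e", "f", "g", "h"].map String.toList).foldl
      (fun acc j => (PySem.List.pyRange 1 9 1).foldl
          (fun acc i => acc ++ [PySem.Int.toChars i ++ j]) acc) []
  -- 'for key in chessboard.keys(): if key in …: return True / return False'
  -- returns on the FIRST key; implicit None when the dict is empty.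
  match chessboard with
  | [] => none
  | (key, _) :: _ => some (allValidPositions.contains key.toList)

-- ===== PORT B =====
-- 'len(key) == 2 and key[0] in "12345678" and key[1] in "abcdefgh"': the two-element
-- match IS the len == 2 test, under which key[0]/key[1] are the two chars; a
-- one-char 'c in s' is the substring test PySem.Chars.isIn [c] s — exact.
def validKey (key : String) : Bool :=
  match key.toList with
  | [c1, c2] =>
      PySem.Chars.isIn [c1] "12345678".toList && PySem.Chars.isIn [c2] "abcdefgh".toList
  | _ => false

def isOnValidSpace_alt (chessboard : List (String × String)) : Option Bool :=
  match chessboard with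
  | [] => none
  | (key, _) :: _ => some (validKey key)

-- ===== PRECONDITION & SPEC =====
def Spec_isOnValidSpace (chessboard : List (String × String)) (out : Option Bool) : Prop := out = isOnValidSpace_alt chessboard
instance (chessboard : List (String × String)) (out : Option Bool) : Decidable (Spec_isOnValidSpace chessboard out) := by unfold Spec_isOnValidSpace; infer_instance

-- ===== CLAIM (what is proved, stated in full; the proofs are below) =====
def Claim_equal_isOnValidSpace : Prop := ∀ (chessboard : List (String × String)), Dom_isOnValidSpace chessboard → Spec_isOnValidSpace chessboard (isOnValidSpace chessboard)

-- ===== LEMMAS AND PROOFS =====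

-- A's generated list is the grid of two-char lists digit-then-file.
theorem allValid_eq :
    ((["a", "b", "c", "d", "e", "f", "g", "h"].map String.toList).foldl
      (fun acc j => (PySem.List.pyRange 1 9 1).foldl
          (fun acc i => acc ++ [PySem.Int.toChars i ++ j]) acc) [])
    = ("abcdefgh".toList.flatMap (fun c2 => "12345678".toList.map (fun c1 => [c1, c2]))) := by
  decide

-- A one-char substring test is char membership.
theorem isIn_singleton (c : Char) (s : List Char) : PySem.Chars.isIn [c] s = decide (c ∈ s) := by
  rcases h : PySem.Chars.isIn [c] s with _ | _
  · have := (PySem.Chars.isIn_eq_false_iff (sub := [c]) (s := s)).mp h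
    simp [List.singleton_infix_iff] at this
    simp [this]
  · have := (PySem.Chars.isIn_iff_infix (sub := [c]) (s := s)).mp h
    simp [List.singleton_infix_iff] at this
    simp [this]

-- Membership in the grid coincides with B's per-key predicate.
theorem contains_eq_validKey (key : String) :
    (("abcdefgh".toList.flatMap (fun c2 => "12345678".toList.map (fun c1 => [c1, c2]))).contains key.toList)
    = validKey key := by
  rw [List.contains_eq_mem]
  have hmem : (key.toList ∈ "abcdefgh".toList.flatMap (fun c2 => "12345678".toList.map (fun c1 => [c1, c2])))
      ↔ ∃ c2 ∈ "abcdefgh".toList, ∃ c1 ∈ "12345678".toList, [c1, c2] = key.toList := by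
    simp only [List.mem_flatMap, List.mem_map]
  unfold validKey
  rcases h : key.toList with _ | ⟨c1, _ | ⟨c2, _ | ⟨c3, rest⟩⟩⟩
  all_goals rw [h] at hmem
  · simp at hmem
    simp
  · simp at hmem
    simp
  · have : (∃ x2 ∈ "abcdefgh".toList, ∃ x1 ∈ "12345678".toList, [x1, x2] = [c1, c2])
        ↔ (c1 ∈ "12345678".toList ∧ c2 ∈ "abcdefgh".toList) := by
      constructor
      · rintro ⟨x2, h2, x1, h1, he⟩
        obtain ⟨rfl, rfl⟩ : x1 = c1 ∧ x2 = c2 := by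
          simpa using he
        exact ⟨h1, h2⟩
      · rintro ⟨h1, h2⟩
        exact ⟨c2, h2, c1, h1, rfl⟩
    change decide _ = (PySem.Chars.isIn [c1] "12345678".toList && PySem.Chars.isIn [c2] "abcdefgh".toList)
    rw [isIn_singleton, isIn_singleton, ← Bool.decide_and]
    exact decide_eq_decide.mpr (hmem.trans this)
  · simp at hmem
    simp

-- ===== VERDICT (by name: the statement is the Claim_ definition above) =====
theorem isOnValidSpace_spec : Claim_equal_isOnValidSpace := by
  intro chessboard _
  unfold Spec_isOnValidSpace isOnValidSpace isOnValidSpace_alt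
  rcases chessboard with _ | ⟨⟨key, v⟩, rest⟩
  · rfl
  · simp only [allValid_eq, contains_eq_validKey]
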